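-- pv_equiv track=rewrite | github.com/KingOfTheAce2/BEAR_AI | src/bear_ai/multimodal/document_analyzer.py | _extract_key_topics
-- ===== SOURCE A (Python) =====
-- from typing import Any, Dict, List, Optional, Union
--
-- def _extract_key_topics(text: str, keywords: List[str]) -> List[str]:
--     """Extract key topics from keywords and context"""
--
--     # Group related keywords into topics
--     topics = []
--
--     # Technology-related topics
--     tech_keywords = [kw for kw in keywords if any(tech in kw for tech in ['tech', 'computer', 'software', 'system', 'data', 'algorithm'])]
--     if tech_keywords:
--         topics.append('Technology')
--
--     # Business-related topics
--     business_keywords = [kw for kw in keywords if any(biz in kw for biz in ['business', 'company', 'market', 'sales', 'revenue'])]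
--     if business_keywords:
--         topics.append('Business')
--
--     # Legal-related topics
--     legal_keywords = [kw for kw in keywords if any(legal in kw for legal in ['legal', 'contract', 'agreement', 'clause', 'liability'])]
--     if legal_keywords:
--         topics.append('Legal')
--
--     # If no specific topics found, use most common keywords as topics
--     if not topics:
--         topics = keywords[:3]
--
--     return topics
-- ===== SOURCE B (Python) =====
-- def _extract_key_topics(text, keywords):
--     """Table-driven inverted index: one flat (substring, label) table scanned
--     with keywords in the inner loop; labels accumulate in a set."""
--     table = [
--         ('tech', 'Technology'), ('computer', 'Technology'), ('software', 'Technology'),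
--         ('system', 'Technology'), ('data', 'Technology'), ('algorithm', 'Technology'),
--         ('business', 'Business'), ('company', 'Business'), ('market', 'Business'),
--         ('sales', 'Business'), ('revenue', 'Business'),
--         ('legal', 'Legal'), ('contract', 'Legal'), ('agreement', 'Legal'),
--         ('clause', 'Legal'), ('liability', 'Legal'),
--     ]
--     found = set()
--     for sub, label in table:
--         if label not in found and any(sub in kw for kw in keywords):
--             found.add(label)
--     topics = [label for label in ('Technology', 'Business', 'Legal') if label in found]
--     return topics if topics else keywords[:3]
-- ===== Notes on version B (the rewrite author's own statement) =====
-- stated objective: alternative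
-- what changed: B replaces A's three label-wise keyword-comprehension passes by a table-driven inverted scan: one flat (substring,label) table is traversed with keywords in the inner loop, matched labels accumulate in a set (rows for already-found labels are skipped, and each any() stops at the first matching keyword), then labels are emitted in the fixed order Technology/Business/Legal.
import Mathlib
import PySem

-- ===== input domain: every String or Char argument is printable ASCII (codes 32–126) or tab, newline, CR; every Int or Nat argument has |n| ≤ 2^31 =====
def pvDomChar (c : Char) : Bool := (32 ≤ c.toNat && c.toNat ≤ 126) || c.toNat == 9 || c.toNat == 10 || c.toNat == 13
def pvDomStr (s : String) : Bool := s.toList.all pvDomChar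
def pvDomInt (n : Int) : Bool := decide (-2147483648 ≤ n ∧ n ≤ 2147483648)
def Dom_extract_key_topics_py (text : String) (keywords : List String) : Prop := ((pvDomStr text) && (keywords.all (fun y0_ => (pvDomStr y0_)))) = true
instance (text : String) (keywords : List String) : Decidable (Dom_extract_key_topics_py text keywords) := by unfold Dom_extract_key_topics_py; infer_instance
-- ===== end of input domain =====

-- B is an inverted-index alternative: one flat (substring, label) table scanned with
-- keywords in the inner loop, labels collected in a set, output in fixed label order.

-- ===== PORT A =====
/-- `any(sub in kw for sub in subs)` — A's inner generator. -/
def pvMatchesAny (subs : List String) (kw : String) : Bool :=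
  subs.any (fun s => PySem.Str.isIn s kw)

def extract_key_topics_py (text : String) (keywords : List String) : List String :=
  let topics : List String := []
  let tech_keywords := keywords.filter (pvMatchesAny (["tech", "computer", "software", "system", "data", "algorithm"] : List String))
  let topics := if ¬ tech_keywords.isEmpty then topics ++ ["Technology"] else topics
  let business_keywords := keywords.filter (pvMatchesAny (["business", "company", "market", "sales", "revenue"] : List String))
  let topics := if ¬ business_keywords.isEmpty then topics ++ ["Business"] else topics
  let legal_keywords := keywords.filter (pvMatchesAny (["legal", "contract", "agreement", "clause", "liability"] : List String))
  let topics := if ¬ legal_keywords.isEmpty then topics ++ ["Legal"] else topics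
  let topics := if topics.isEmpty then PySem.List.slice keywords none (some 3) else topics
  topics

-- ===== PORT B =====
/-- B's flat (substring, label) table. -/
def pvTable : List (String × String) :=
  [("tech", "Technology"), ("computer", "Technology"), ("software", "Technology"),
   ("system", "Technology"), ("data", "Technology"), ("algorithm", "Technology"),
   ("business", "Business"), ("company", "Business"), ("market", "Business"),
   ("sales", "Business"), ("revenue", "Business"),
   ("legal", "Legal"), ("contract", "Legal"), ("agreement", "Legal"),
   ("clause", "Legal"), ("liability", "Legal")]

def extract_key_topics_py_alt (text : String) (keywords : List String) : List String :=
  let found : PySem.Set String :=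
    pvTable.foldl
      (fun found p =>
        if !(PySem.Set.contains found p.2)
            && keywords.any (fun kw => PySem.Str.isIn p.1 kw) then
          PySem.Set.add found p.2
        else found)
      PySem.Set.empty
  let topics := (["Technology", "Business", "Legal"] : List String).filter
      (fun label => PySem.Set.contains found label)
  if topics.isEmpty then PySem.List.slice keywords none (some 3) else topics

-- ===== PRECONDITION & SPEC =====
def Spec_extract_key_topics_py (text : String) (keywords : List String) (out : List String) : Prop := out = extract_key_topics_py_alt text keywords
instance (text : String) (keywords : List String) (out : List String) : Decidable (Spec_extract_key_topics_py text keywords out) := by unfold Spec_extract_key_topics_py; infer_instance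

-- ===== CLAIM =====
def Claim_equal_extract_key_topics_py : Prop := ∀ (text : String) (keywords : List String), Dom_extract_key_topics_py text keywords → Spec_extract_key_topics_py text keywords (extract_key_topics_py text keywords)

-- ===== LEMMAS AND PROOFS =====

/-- Membership after B's table fold: a label is in `found` iff some table row
carries it and its substring occurs in some keyword; the `label not in found`
guard only skips duplicate insertions. -/
theorem pvMem_fold (keywords : List String) (t : List (String × String)) (s : PySem.Set String) (y : String) :
    (y ∈ t.foldl
        (fun found (p : String × String) =>
          if !(PySem.Set.contains found p.2)
              && keywords.any (fun kw => PySem.Str.isIn p.1 kw) then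
            PySem.Set.add found p.2
          else found) s)
      ↔ y ∈ s ∨ t.any (fun p => p.2 == y && keywords.any (fun kw => PySem.Str.isIn p.1 kw)) = true := by
  induction t generalizing s with
  | nil => simp
  | cons q t ih =>
    rw [List.foldl_cons]
    by_cases hc : PySem.Set.contains s q.2 = true <;>
      by_cases hk : (keywords.any fun kw => PySem.Str.isIn q.1 kw) = true
    · have hq := (PySem.Set.contains_iff s q.2).mp hc
      rw [hc, Bool.not_true, Bool.false_and, if_neg (by decide : ¬ (false = true)), ih]
      simp only [List.any_cons, Bool.or_eq_true, Bool.and_eq_true, beq_iff_eq, hk, and_true]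
      constructor
      · tauto
      · rintro (h | heq | h)
        · exact Or.inl h
        · exact Or.inl (heq ▸ hq)
        · exact Or.inr h
    · have hq := (PySem.Set.contains_iff s q.2).mp hc
      rw [hc, Bool.not_true, Bool.false_and, if_neg (by decide : ¬ (false = true)), ih]
      simp only [List.any_cons, Bool.or_eq_true, Bool.and_eq_true, beq_iff_eq,
        eq_false_of_ne_true hk, Bool.false_eq_true, and_false, false_or]
    · rw [eq_false_of_ne_true hc, Bool.not_false, Bool.true_and, hk,
        if_pos (rfl : true = true), ih]
      simp only [PySem.Set.mem_add, List.any_cons, Bool.or_eq_true, Bool.and_eq_true,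
        beq_iff_eq, hk, and_true]
      constructor
      · rintro ((h | h) | h)
        · exact Or.inl h
        · exact Or.inr (Or.inl h.symm)
        · exact Or.inr (Or.inr h)
      · rintro (h | heq | h)
        · exact Or.inl (Or.inl h)
        · exact Or.inl (Or.inr heq.symm)
        · exact Or.inr h
    · rw [eq_false_of_ne_true hc, Bool.not_false, Bool.true_and, eq_false_of_ne_true hk,
        if_neg (by decide : ¬ (false = true)), ih]
      simp only [List.any_cons, Bool.or_eq_true, Bool.and_eq_true, beq_iff_eq,
        eq_false_of_ne_true hk, Bool.false_eq_true, and_false, false_or]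

/-- Swapping the two `any`s: A checks keywords outer / substrings inner, B the reverse. -/
theorem pvAny_swap (keywords subs : List String) :
    keywords.any (pvMatchesAny subs) = subs.any (fun s => keywords.any (fun kw => PySem.Str.isIn s kw)) := by
  rw [Bool.eq_iff_iff]
  simp only [pvMatchesAny, List.any_eq_true]
  constructor
  · rintro ⟨kw, hkw, s, hs, h⟩
    exact ⟨s, hs, kw, hkw, h⟩
  · rintro ⟨s, hs, kw, hkw, h⟩
    exact ⟨kw, hkw, s, hs, h⟩

theorem isEmpty_filter_eq_not_any {α : Type} (l : List α) (p : α → Bool) :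
    (l.filter p).isEmpty = !l.any p := by
  cases h : l.any p <;>
    simp_all [List.isEmpty_iff, List.filter_eq_nil_iff, List.any_eq_true, List.any_eq_false]

/-- B's fold: the step function, named for the contains-lemmas below. -/
theorem pvContainsT (keywords : List String) :
    PySem.Set.contains
      (pvTable.foldl
        (fun found (p : String × String) =>
          if !(PySem.Set.contains found p.2)
              && keywords.any (fun kw => PySem.Str.isIn p.1 kw) then
            PySem.Set.add found p.2
          else found) PySem.Set.empty) "Technology"
    = keywords.any (pvMatchesAny ["tech", "computer", "software", "system", "data", "algorithm"]) := by
  rw [Bool.eq_iff_iff, PySem.Set.contains_iff _ _, pvMem_fold, pvAny_swap]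
  simp [pvTable, PySem.Set.empty]

theorem pvContainsB (keywords : List String) :
    PySem.Set.contains
      (pvTable.foldl
        (fun found (p : String × String) =>
          if !(PySem.Set.contains found p.2)
              && keywords.any (fun kw => PySem.Str.isIn p.1 kw) then
            PySem.Set.add found p.2
          else found) PySem.Set.empty) "Business"
    = keywords.any (pvMatchesAny ["business", "company", "market", "sales", "revenue"]) := by
  rw [Bool.eq_iff_iff, PySem.Set.contains_iff _ _, pvMem_fold, pvAny_swap]
  simp [pvTable, PySem.Set.empty]

theorem pvContainsL (keywords : List String) :
    PySem.Set.contains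
      (pvTable.foldl
        (fun found (p : String × String) =>
          if !(PySem.Set.contains found p.2)
              && keywords.any (fun kw => PySem.Str.isIn p.1 kw) then
            PySem.Set.add found p.2
          else found) PySem.Set.empty) "Legal"
    = keywords.any (pvMatchesAny ["legal", "contract", "agreement", "clause", "liability"]) := by
  rw [Bool.eq_iff_iff, PySem.Set.contains_iff _ _, pvMem_fold, pvAny_swap]
  simp [pvTable, PySem.Set.empty]

-- ===== VERDICT =====
theorem extract_key_topics_py_spec : Claim_equal_extract_key_topics_py := by
  intro text keywords _
  unfold Spec_extract_key_topics_py
  simp only [extract_key_topics_py, extract_key_topics_py_alt, isEmpty_filter_eq_not_any,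
    List.filter_cons, List.filter_nil, pvContainsT, pvContainsB, pvContainsL]
  rcases hT : keywords.any (pvMatchesAny ["tech", "computer", "software", "system", "data", "algorithm"]) <;>
  rcases hB : keywords.any (pvMatchesAny ["business", "company", "market", "sales", "revenue"]) <;>
  rcases hL : keywords.any (pvMatchesAny ["legal", "contract", "agreement", "clause", "liability"]) <;>
    simp [hT, hB, hL]
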